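-- pv_equiv track=rewrite | github.com/45787941/cryptoM2 | tpaes/aes.py | convert_to_state
-- ===== SOURCE A (Python) =====
-- def convert_to_state(message):
--     # renvoie un message ou une cl'e sous forme d''etat
-- 	state = [0]*4
-- 	for i in range(0,4):
-- 		state[i] = []
-- 	i = 0
-- 	j = 0
-- 	while(i < len(message)):
-- 		state[j].append(ord(message[i]))
-- 		i += 1
-- 		j += 1
-- 		if(i%4 == 0):
-- 			j = 0
-- 	return state
-- ===== SOURCE B (Python) =====
-- def convert_to_state(message):
--     return [[ord(c) for c in message[r::4]] for r in range(4)]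
-- ===== Notes on version B (the rewrite author's own statement) =====
-- stated objective: idiomatic
-- what changed: Replaces the single indexed while-loop with a manually cycled row pointer by building each of the four rows independently from a strided slice message[r::4].
import Mathlib
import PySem

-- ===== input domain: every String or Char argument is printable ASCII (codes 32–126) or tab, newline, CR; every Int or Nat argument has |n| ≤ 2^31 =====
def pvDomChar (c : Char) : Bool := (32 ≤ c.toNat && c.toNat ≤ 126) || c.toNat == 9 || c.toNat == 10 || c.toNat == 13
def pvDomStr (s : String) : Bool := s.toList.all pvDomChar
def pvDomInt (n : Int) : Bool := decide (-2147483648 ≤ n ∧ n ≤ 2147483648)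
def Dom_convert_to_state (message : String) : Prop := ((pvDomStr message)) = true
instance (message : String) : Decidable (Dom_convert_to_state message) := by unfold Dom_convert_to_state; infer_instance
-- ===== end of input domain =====

-- B builds the four rows independently from strided slices message[r::4] instead of
-- A's single while-loop with a cyclically reset row pointer; objective: idiomatic.

-- ===== PORT A =====
-- the while-loop of A: state[j].append(ord(message[i])); i += 1; j += 1; if i%4==0: j = 0
def pvLoopA : List Char → Nat → Nat → List (List Int) → List (List Int)
  | [], _, _, st => st
  | c :: rest, i, j, st =>
      let st' := st.modify j (fun row => row ++ [(c.toNat : Int)])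
      let i' := i + 1
      let j' := if i' % 4 == 0 then 0 else j + 1
      pvLoopA rest i' j' st'

def convert_to_state (message : String) : List (List Int) :=
  -- state = [0]*4; for i in range(0,4): state[i] = []
  -- (the int placeholders of [0]*4 are untypeable and dead; the init loop overwrites
  --  every slot with [], ported as setting each slot of a 4-slot list to [])
  let state : List (List Int) :=
    (PySem.List.pyRange 0 4 1).foldl (fun st i => st.set i.toNat []) (List.replicate 4 [])
  pvLoopA message.toList 0 0 state

-- ===== PORT B =====
def convert_to_state_alt (message : String) : List (List Int) :=
  -- [[ord(c) for c in message[r::4]] for r in range(4)]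
  (PySem.List.pyRange 0 4 1).map (fun r =>
    match PySem.List.slice? message.toList (some r) none 4 with
    | some cs => cs.map (fun c => (c.toNat : Int))
    | none => [])

-- ===== PRECONDITION & SPEC =====
def Spec_convert_to_state (message : String) (out : List (List Int)) : Prop := out = convert_to_state_alt message
instance (message : String) (out : List (List Int)) : Decidable (Spec_convert_to_state message out) := by unfold Spec_convert_to_state; infer_instance

-- ===== CLAIM (what is proved, stated in full; the proofs are below) =====
def Claim_equal_convert_to_state : Prop := ∀ (message : String), Dom_convert_to_state message → Spec_convert_to_state message (convert_to_state message)

-- ===== LEMMAS AND PROOFS =====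

-- every 4th element, starting at the head
def pvEvery4 {α : Type} : List α → List α
  | a :: _ :: _ :: _ :: rest => a :: pvEvery4 rest
  | a :: _ => [a]
  | [] => []

lemma pvEvery4_cons {α : Type} (c : α) (cs : List α) :
    pvEvery4 (c :: cs) = c :: pvEvery4 (cs.drop 3) := by
  rcases cs with _ | ⟨b, _ | ⟨d, _ | ⟨e, t⟩⟩⟩ <;> simp [pvEvery4]

def pvOrds (cs : List Char) : List Int := (pvEvery4 cs).map (fun c => (c.toNat : Int))

lemma pvOrds_cons (c : Char) (cs : List Char) :
    pvOrds (c :: cs) = (c.toNat : Int) :: pvOrds (cs.drop 3) := by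
  simp [pvOrds, pvEvery4_cons]

-- A's loop, under the invariant j = i % 4, distributes chars to rows by index mod 4
lemma pvLoopA_char : ∀ (cs : List Char) (i : Nat) (s0 s1 s2 s3 : List Int),
    pvLoopA cs i (i % 4) [s0, s1, s2, s3] =
      [s0 ++ pvOrds (cs.drop ((0 + 4 - i % 4) % 4)),
       s1 ++ pvOrds (cs.drop ((1 + 4 - i % 4) % 4)),
       s2 ++ pvOrds (cs.drop ((2 + 4 - i % 4) % 4)),
       s3 ++ pvOrds (cs.drop ((3 + 4 - i % 4) % 4))] := by
  intro cs
  induction cs with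
  | nil => intro i s0 s1 s2 s3; simp [pvLoopA, pvOrds, pvEvery4]
  | cons c rest ih =>
    intro i s0 s1 s2 s3
    have hm : i % 4 = 0 ∨ i % 4 = 1 ∨ i % 4 = 2 ∨ i % 4 = 3 := by omega
    rcases hm with h | h | h | h
    · have h2 : (i + 1) % 4 = 1 := by omega
      have ihh := ih (i + 1) (s0 ++ [(c.toNat : Int)]) s1 s2 s3
      rw [h2] at ihh
      have hmod : [s0, s1, s2, s3].modify 0 (fun row => row ++ [(c.toNat : Int)]) = [(fun row => row ++ [(c.toNat : Int)]) s0, s1, s2, s3] := by simp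
      simp only [pvLoopA, h, h2, hmod]
      simp [ihh, pvOrds_cons]
    · have h2 : (i + 1) % 4 = 2 := by omega
      have ihh := ih (i + 1) s0 (s1 ++ [(c.toNat : Int)]) s2 s3
      rw [h2] at ihh
      have hmod : [s0, s1, s2, s3].modify 1 (fun row => row ++ [(c.toNat : Int)]) = [s0, (fun row => row ++ [(c.toNat : Int)]) s1, s2, s3] := by simp
      simp only [pvLoopA, h, h2, hmod]
      simp [ihh, pvOrds_cons]
    · have h2 : (i + 1) % 4 = 3 := by omega
      have ihh := ih (i + 1) s0 s1 (s2 ++ [(c.toNat : Int)]) s3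
      rw [h2] at ihh
      have hmod : [s0, s1, s2, s3].modify 2 (fun row => row ++ [(c.toNat : Int)]) = [s0, s1, (fun row => row ++ [(c.toNat : Int)]) s2, s3] := by simp
      simp only [pvLoopA, h, h2, hmod]
      simp [ihh, pvOrds_cons]
    · have h2 : (i + 1) % 4 = 0 := by omega
      have ihh := ih (i + 1) s0 s1 s2 (s3 ++ [(c.toNat : Int)])
      rw [h2] at ihh
      have hmod : [s0, s1, s2, s3].modify 3 (fun row => row ++ [(c.toNat : Int)]) = [s0, s1, s2, (fun row => row ++ [(c.toNat : Int)]) s3] := by simp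
      simp only [pvLoopA, h, h2, hmod]
      simp [ihh, pvOrds_cons]

-- the filterMap body of slice? with step 4 computes pvEvery4
lemma pvFilterMap_every4 : ∀ (fuel : Nat) (xs : List Char) (s : Nat), xs.length - s ≤ fuel →
    (List.range (if ((s : Int)) < (xs.length : Int)
        then (((xs.length : Int) - (s : Int) + 4 - 1) / 4).toNat else 0)).filterMap
      (fun k => xs[(((s : Int)) + 4 * (k : Nat)).toNat]?) = pvEvery4 (xs.drop s) := by
  intro fuel
  induction fuel with
  | zero =>
    intro xs s h
    have hs : xs.length ≤ s := by omega
    rw [if_neg (by exact_mod_cast not_lt.mpr hs)]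
    simp [List.drop_eq_nil_of_le hs, pvEvery4]
  | succ f ihf =>
    intro xs s h
    by_cases hs : s < xs.length
    · have hcnt : (((xs.length : Int) - (s : Int) + 4 - 1) / 4).toNat
          = (if (((s + 4 : Nat) : Int)) < (xs.length : Int)
              then (((xs.length : Int) - ((s + 4 : Nat) : Int) + 4 - 1) / 4).toNat else 0) + 1 := by
        push_cast
        split_ifs <;> omega
      rw [if_pos (by exact_mod_cast hs), hcnt, List.range_succ_eq_map]
      rw [List.filterMap_cons, List.filterMap_map]
      have hhead : xs[(((s : Int)) + 4 * ((0 : Nat) : Int)).toNat]? = some (xs[s]'hs) := by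
        have : (((s : Int)) + 4 * ((0 : Nat) : Int)).toNat = s := by omega
        rw [this]; exact List.getElem?_eq_getElem hs
      have hfun : (fun k : Nat => xs[(((s : Int)) + 4 * ((Nat.succ k : Nat) : Int)).toNat]?)
          = fun k : Nat => xs[((((s + 4 : Nat) : Int)) + 4 * (k : Nat)).toNat]? := by
        funext k
        congr 1
        push_cast
        omega
      simp only [Function.comp_def, Nat.succ_eq_add_one] at *
      rw [hhead]
      have hrest : (List.range (if (((s + 4 : Nat) : Int)) < (xs.length : Int)
            then (((xs.length : Int) - ((s + 4 : Nat) : Int) + 4 - 1) / 4).toNat else 0)).filterMap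
          (fun k => xs[(((s : Int)) + 4 * ((k + 1 : Nat) : Int)).toNat]?)
          = pvEvery4 (xs.drop (s + 4)) := by
        rw [show (fun k : Nat => xs[(((s : Int)) + 4 * ((k + 1 : Nat) : Int)).toNat]?)
              = fun k : Nat => xs[((((s + 4 : Nat) : Int)) + 4 * (k : Nat)).toNat]? by
            funext k; congr 1; push_cast; omega]
        exact ihf xs (s + 4) (by omega)
      rw [hrest]
      rw [List.drop_eq_getElem_cons hs, pvEvery4_cons, List.drop_drop]
    · have hs' : xs.length ≤ s := by omega
      rw [if_neg (by exact_mod_cast not_lt.mpr hs')]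
      simp [List.drop_eq_nil_of_le hs', pvEvery4]

lemma pvSlice4 (xs : List Char) (r : Int) (hr : 0 ≤ r) :
    PySem.List.slice? xs (some r) none 4 = some (pvEvery4 (xs.drop r.toNat)) := by
  have h4 : ¬ ((4 : Int) = 0) := by norm_num
  have h4' : ¬ ((4 : Int) < 0) := by norm_num
  simp only [PySem.List.slice?, PySem.List.sliceIndices, if_neg h4, if_neg h4']
  rw [if_neg (not_lt.mpr hr)]
  have hmin : min r (xs.length : Int) = ((min r.toNat xs.length : Nat) : Int) := by
    push_cast; omega
  rw [hmin]
  have hdrop : xs.drop (min r.toNat xs.length) = xs.drop r.toNat := by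
    rcases le_total r.toNat xs.length with hle | hle
    · rw [Nat.min_eq_left hle]
    · rw [Nat.min_eq_right hle]
      simp [List.drop_eq_nil_of_le, hle]
  rw [← hdrop]
  congr 1
  exact pvFilterMap_every4 (xs.length - min r.toNat xs.length) xs (min r.toNat xs.length) (le_refl _)

-- ===== VERDICT (by name: the statement is the Claim_ definition above) =====
theorem convert_to_state_spec : Claim_equal_convert_to_state := by
  unfold Claim_equal_convert_to_state
  intro message _
  unfold Spec_convert_to_state
  simp only [convert_to_state, convert_to_state_alt]
  have hrange : PySem.List.pyRange 0 4 1 = [0, 1, 2, 3] := by decide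
  have hinit : ([(0 : Int), 1, 2, 3]).foldl (fun st i => st.set i.toNat []) (List.replicate 4 ([] : List Int)) = [[], [], [], []] := by decide
  rw [hrange, hinit]
  have hA := pvLoopA_char message.toList 0 [] [] [] []
  simp only [Nat.zero_mod] at hA
  norm_num at hA
  rw [hA]
  rw [List.map_cons, List.map_cons, List.map_cons, List.map_cons, List.map_nil]
  rw [pvSlice4 _ 0 (by norm_num), pvSlice4 _ 1 (by norm_num),
      pvSlice4 _ 2 (by norm_num), pvSlice4 _ 3 (by norm_num)]
  simp [pvOrds]
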